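-- pv_equiv track=rewrite | github.com/lalitgehani/SnackBase | src/snackbase/infrastructure/api/routes/records_router.py | _parse_expand_param
-- ===== SOURCE A (Python) =====
-- def _parse_expand_param(
--     expand: str, schema: list[dict]
-- ) -> tuple[list[list[str]], str | None]:
--     """Parse and validate the ?expand= query parameter.
--
--     Args:
--         expand: Comma-separated expand paths, e.g. "company,team.industry"
--         schema: The collection schema to validate reference fields.
--
--     Returns:
--         Tuple of (parsed paths, invalid_field_name). If invalid_field_name is not None,
--         it means that field is not a reference type and should return a 400 error.
--     """
--     schema_lookup = {f["name"]: f for f in schema}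
--     paths: list[list[str]] = []
--     for raw in expand.split(","):
--         raw = raw.strip()
--         if not raw:
--             continue
--         parts = [p.strip() for p in raw.split(".") if p.strip()]
--         if not parts:
--             continue
--         root = parts[0]
--         field_def = schema_lookup.get(root)
--         if not field_def or field_def.get("type") != "reference":
--             return [], root
--         paths.append(parts)
--     return paths, None
-- ===== SOURCE B (Python) =====
-- def _parse_expand_param(expand, schema):
--     # precompute the set of expandable roots: names whose (last-wins) field type is "reference"
--     types = {f["name"]: f.get("type") for f in schema}
--     valid = {name for name, t in types.items() if t == "reference"}
--     # single character-level scan: '.' ends a part, ',' ends a path; parts stripped, empties dropped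
--     paths = []
--     path = []
--     cur = []
--     for ch in expand + ",":
--         if ch == "," or ch == ".":
--             part = "".join(cur).strip()
--             cur = []
--             if part:
--                 path.append(part)
--             if ch == ",":
--                 if path:
--                     if path[0] not in valid:
--                         return [], path[0]
--                     paths.append(path)
--                 path = []
--         else:
--             cur.append(ch)
--     return paths, None
-- ===== Notes on version B (the rewrite author's own statement) =====
-- stated objective: alternative
-- what changed: Replaced A's split/strip token pipeline over a dict of field definitions by a single character-level state machine over the raw string (explicit part/path accumulators, '.' ends a part, ',' ends a path) that validates each path root against a precomputed set of valid reference root names.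
-- outside the precondition, e.g. on _parse_expand_param('a', [{'type': 'reference'}]): A raises KeyError, B raises KeyError
import Mathlib
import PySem

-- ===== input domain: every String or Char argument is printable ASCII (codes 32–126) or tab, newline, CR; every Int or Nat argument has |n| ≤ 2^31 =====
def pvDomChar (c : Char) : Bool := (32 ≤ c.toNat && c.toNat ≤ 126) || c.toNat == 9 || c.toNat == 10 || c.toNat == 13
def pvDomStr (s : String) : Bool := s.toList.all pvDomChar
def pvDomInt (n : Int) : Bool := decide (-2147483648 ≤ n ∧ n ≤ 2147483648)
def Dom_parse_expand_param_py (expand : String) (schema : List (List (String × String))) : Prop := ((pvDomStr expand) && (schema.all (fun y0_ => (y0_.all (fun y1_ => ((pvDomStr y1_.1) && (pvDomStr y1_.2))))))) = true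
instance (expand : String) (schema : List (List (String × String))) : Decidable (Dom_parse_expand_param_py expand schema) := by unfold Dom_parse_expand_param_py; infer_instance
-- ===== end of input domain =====

-- B replaces A's split/strip token pipeline over a dict of field definitions by a single
-- character-level state machine over the raw string, validating roots against a precomputed
-- set of valid reference root names; return values proved equal on Pre_ (every field dict has "name").

-- ===== PORT A =====
-- s.split(sep) for a nonempty literal sep; split? is some there, the getD [] default is never reached
def pvSplit (s sep : String) : List String := (PySem.Str.split? s sep).getD []

-- schema_lookup = {f["name"]: f for f in schema}; f["name"] raises KeyError when absent — those
-- inputs are excluded by Pre_; the port reads getD "name" "" which is exact under Pre_.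
def pvLookup (schema : List (List (String × String))) : PySem.Dict String (PySem.Dict String String) :=
  schema.foldl (fun d f =>
    let fd := PySem.Dict.ofList f
    d.insert (fd.getD "name" "") fd) PySem.Dict.empty

-- the for-loop of A, with its early return
def pvA_loop (sl : PySem.Dict String (PySem.Dict String String)) :
    List String → List (List String) → List (List String) × Option String
  | [], paths => (paths, none)
  | raw :: rest, paths =>
    let raw' := PySem.Str.strip raw
    if raw' = "" then pvA_loop sl rest paths
    else
      let parts := ((pvSplit raw' ".").map PySem.Str.strip).filter (fun p => !(p == ""))
      if parts.isEmpty then pvA_loop sl rest paths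
      else
        let root := parts.headD ""
        match sl.get? root with
        | none => ([], some root)
        | some fd =>
          if fd.items.isEmpty || !(fd.get? "type" == some "reference") then ([], some root)
          else pvA_loop sl rest (paths ++ [parts])

def parse_expand_param_py (expand : String) (schema : List (List (String × String))) : List (List String) × Option String :=
  pvA_loop (pvLookup schema) (pvSplit expand ",") []

-- ===== PORT B =====
-- types = {f["name"]: f.get("type") for f in schema}
def pvTypes (schema : List (List (String × String))) : PySem.Dict String (Option String) :=
  schema.foldl (fun d f =>
    let fd := PySem.Dict.ofList f
    d.insert (fd.getD "name" "") (fd.get? "type")) PySem.Dict.empty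

-- valid = {name for name, t in types.items() if t == "reference"}
def pvValid (schema : List (List (String × String))) : PySem.Set String :=
  PySem.Set.ofList (((pvTypes schema).items.filter (fun p => p.2 == some "reference")).map (·.1))

-- the character-level scan: '.' ends a part, ',' ends a path; early return on an invalid root
def pvScan (valid : PySem.Set String) :
    List Char → List (List String) → List String → List Char → List (List String) × Option String
  | [], paths, _path, _cur => (paths, none)
  | ch :: rest, paths, path, cur =>
    if ch = ',' ∨ ch = '.' then
      let part := PySem.Str.strip (String.ofList cur)               -- "".join(cur).strip()
      let path' := if part = "" then path else path ++ [part]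
      if ch = ',' then
        if path'.isEmpty then pvScan valid rest paths [] []
        else if path'.headD "" ∈ valid then pvScan valid rest (paths ++ [path']) [] []
        else ([], some (path'.headD ""))
      else pvScan valid rest paths path' []
    else pvScan valid rest paths path (cur ++ [ch])

def parse_expand_param_py_alt (expand : String) (schema : List (List (String × String))) : List (List String) × Option String :=
  pvScan (pvValid schema) (expand.toList ++ [',']) [] [] []

-- ===== PRECONDITION & SPEC =====
-- Pre_ excludes schemas in which some field dict lacks the key "name": there Python A (and B) raise KeyError.
def Pre_parse_expand_param_py (expand : String) (schema : List (List (String × String))) : Prop :=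
  ∀ f ∈ schema, "name" ∈ f.map Prod.fst
instance (expand : String) (schema : List (List (String × String))) : Decidable (Pre_parse_expand_param_py expand schema) := by unfold Pre_parse_expand_param_py; infer_instance

def pvWitness_parse_expand_param_py : String × (List (List (String × String))) :=
  ("company,team.industry", [[("name","company"),("type","reference")],[("name","team"),("type","reference")]])

def Spec_parse_expand_param_py (expand : String) (schema : List (List (String × String))) (out : List (List String) × Option String) : Prop := out = parse_expand_param_py_alt expand schema
instance (expand : String) (schema : List (List (String × String))) (out : List (List String) × Option String) : Decidable (Spec_parse_expand_param_py expand schema out) := by unfold Spec_parse_expand_param_py; infer_instance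

-- ===== CLAIM (what is proved, stated in full; the proofs are below) =====
def Claim_equal_parse_expand_param_py : Prop := ∀ (expand : String) (schema : List (List (String × String))), Dom_parse_expand_param_py expand schema → Pre_parse_expand_param_py expand schema → Spec_parse_expand_param_py expand schema (parse_expand_param_py expand schema)

-- ===== LEMMAS AND PROOFS =====

-- a simple split-on-one-char recursion, used as the common reference shape
def splitC (d : Char) (pre : List Char) : List Char → List (List Char)
  | [] => [pre]
  | c :: rest => if c = d then pre :: splitC d [] rest else splitC d (pre ++ [c]) rest

-- PySem's fuelled splitOn.go, for a one-char separator, is splitC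
theorem splitOn_go_eq (d : Char) :
    ∀ (l : List Char) (fuel : Nat), l.length < fuel → ∀ (cur : List Char) (acc : List (List Char)),
      PySem.Chars.splitOn.go [d] fuel l cur acc = acc.reverse ++ splitC d cur.reverse l := by
  intro l
  induction l with
  | nil =>
    intro fuel hf cur acc
    cases fuel with
    | zero => omega
    | succ f => simp [PySem.Chars.splitOn.go, splitC]
  | cons c rest ih =>
    intro fuel hf cur acc
    cases fuel with
    | zero => omega
    | succ f =>
      by_cases hc : c = d
      · subst hc
        have hp : List.isPrefixOf [c] (c :: rest) = true := by
          simp [List.isPrefixOf]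
        rw [PySem.Chars.splitOn.go]
        simp only [hp, if_pos]
        rw [show List.drop [c].length (c :: rest) = rest from by simp,
            ih f (by simp at hf; omega) [] (cur.reverse :: acc)]
        simp [splitC]
      · have hp : List.isPrefixOf [d] (c :: rest) = false := by
          simp [List.isPrefixOf, BEq.beq]
          intro h; exact absurd h.symm hc
        rw [PySem.Chars.splitOn.go]
        simp only [hp]
        rw [if_neg (by simp)]
        have := ih f (by simpa using Nat.lt_of_succ_lt_succ hf) (c :: cur) acc
        rw [this]
        simp [splitC, hc]

theorem splitOn_eq (d : Char) (s : List Char) :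
    PySem.Chars.splitOn s [d] = splitC d [] s := by
  unfold PySem.Chars.splitOn
  simpa using splitOn_go_eq d s (s.length + 1) (by omega) [] []

theorem pvSplit_char (s : String) (d : Char) (sep : String) (hsep : sep.toList = [d]) :
    pvSplit s sep = (splitC d [] s.toList).map String.ofList := by
  simp [pvSplit, PySem.Str.split?, PySem.Chars.split?, hsep, splitOn_eq]

-- abbreviations for the proof
def wsChar (c : Char) : Bool := PySem.Chars.isspace c

-- the stripped segments of a token (char level)
def Mpre (pre : List Char) (t : List Char) : List (List Char) :=
  (splitC '.' pre t).map PySem.Chars.strip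

theorem strip_ws_prefix (w p : List Char) (hw : ∀ c ∈ w, wsChar c = true) :
    PySem.Chars.strip (w ++ p) = PySem.Chars.strip p := by
  unfold PySem.Chars.strip PySem.Chars.lstrip
  rw [List.dropWhile_append]
  have : List.dropWhile PySem.Chars.isspace w = [] := by
    rw [List.dropWhile_eq_nil_iff]; intro x hx; exact hw x hx
  simp [this]

theorem Mpre_ws_prefix (t : List Char) : ∀ (p w : List Char), (∀ c ∈ w, wsChar c = true) →
    Mpre (w ++ p) t = Mpre p t := by
  induction t with
  | nil =>
    intro p w hw
    simp [Mpre, splitC, strip_ws_prefix w p hw]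
  | cons c rest ih =>
    intro p w hw
    by_cases hc : c = '.'
    · subst hc
      simp [Mpre, splitC, strip_ws_prefix w p hw]
    · simp only [Mpre, splitC, if_neg hc]
      have := ih (p ++ [c]) w hw
      simpa [Mpre, List.append_assoc] using this

theorem Mpre_lstrip (t : List Char) : Mpre [] (PySem.Chars.lstrip t) = Mpre [] t := by
  induction t with
  | nil => rfl
  | cons c rest ih =>
    by_cases hc : wsChar c = true
    · have hcd : c ≠ '.' := by
        intro h; rw [h] at hc; exact absurd hc (by decide)
      have h1 : PySem.Chars.lstrip (c :: rest) = PySem.Chars.lstrip rest := by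
        simp [PySem.Chars.lstrip, show PySem.Chars.isspace c = true from hc]
      have h2 : Mpre [] (c :: rest) = Mpre [c] rest := by
        simp [Mpre, splitC, hcd]
      have h3 := Mpre_ws_prefix rest [] [c] (by intro x hx; simp at hx; subst hx; exact hc)
      rw [h1, ih, h2]
      simpa using h3.symm
    · have h1 : PySem.Chars.lstrip (c :: rest) = c :: rest := by
        simp [PySem.Chars.lstrip, show PySem.Chars.isspace c = false from (by simpa using hc)]
      rw [h1]

theorem rstrip_append_ws (x : List Char) (c : Char) (hc : wsChar c = true) :
    PySem.Chars.rstrip (x ++ [c]) = PySem.Chars.rstrip x := by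
  simp [PySem.Chars.rstrip, List.dropWhile_cons, show PySem.Chars.isspace c = true from hc]

theorem rstrip_append_not_ws (x : List Char) (c : Char) (hc : wsChar c = false) :
    PySem.Chars.rstrip (x ++ [c]) = x ++ [c] := by
  simp [PySem.Chars.rstrip, List.dropWhile_cons, show PySem.Chars.isspace c = false from hc]

theorem strip_append_ws (s : List Char) (c : Char) (hc : wsChar c = true) :
    PySem.Chars.strip (s ++ [c]) = PySem.Chars.strip s := by
  unfold PySem.Chars.strip
  have : PySem.Chars.lstrip (s ++ [c]) =
      if (PySem.Chars.lstrip s).isEmpty then [] else PySem.Chars.lstrip s ++ [c] := by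
    unfold PySem.Chars.lstrip
    rw [List.dropWhile_append]
    by_cases h : (List.dropWhile PySem.Chars.isspace s).isEmpty
    · simp [h, List.dropWhile_cons, show PySem.Chars.isspace c = true from hc]
    · simp [h]
  rw [this]
  by_cases h : (PySem.Chars.lstrip s).isEmpty
  · have hs : PySem.Chars.lstrip s = [] := by simpa [List.isEmpty_iff] using h
    rw [if_pos h, hs]
  · simp only [h, Bool.false_eq_true, if_false]
    exact rstrip_append_ws _ c hc

theorem Mpre_append_ws (c : Char) (hc : wsChar c = true) :
    ∀ (xs pre : List Char), Mpre pre (xs ++ [c]) = Mpre pre xs := by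
  intro xs
  induction xs with
  | nil =>
    intro pre
    have hcd : c ≠ '.' := by intro h; rw [h] at hc; exact absurd hc (by decide)
    simp [Mpre, splitC, hcd, strip_append_ws pre c hc]
  | cons x r ih =>
    intro pre
    by_cases hx : x = '.'
    · subst hx
      simp [Mpre, splitC]
      have := ih []
      simpa [Mpre] using this
    · simp only [List.cons_append, Mpre, splitC, if_neg hx]
      have := ih (pre ++ [x])
      simpa [Mpre] using this

theorem Mpre_rstrip (t : List Char) : Mpre [] (PySem.Chars.rstrip t) = Mpre [] t := by
  induction t using List.reverseRecOn with
  | nil => rfl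
  | append_singleton xs c ih =>
    by_cases hc : wsChar c = true
    · rw [rstrip_append_ws xs c hc, ih, Mpre_append_ws c hc]
    · rw [rstrip_append_not_ws xs c (by simpa using hc)]

theorem Mpre_strip (t : List Char) : Mpre [] (PySem.Chars.strip t) = Mpre [] t := by
  unfold PySem.Chars.strip
  rw [Mpre_rstrip, Mpre_lstrip]

-- parts of a token as Strings, from pending segment cur
def pvParts (cur t : List Char) : List String :=
  ((splitC '.' cur t).map (fun s => String.ofList (PySem.Chars.strip s))).filter (fun p => !(p == ""))

-- the common reference loop over tokens
def RefLoop (cond : String → Bool) : List (List Char) → List (List String) → List (List String) × Option String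
  | [], acc => (acc, none)
  | t :: ts, acc =>
    let parts := pvParts [] t
    if parts.isEmpty then RefLoop cond ts acc
    else if cond (parts.headD "") then RefLoop cond ts (acc ++ [parts])
    else ([], some (parts.headD ""))

-- A's validity test, as a predicate on the root
def condA (sl : PySem.Dict String (PySem.Dict String String)) (root : String) : Bool :=
  match sl.get? root with
  | none => false
  | some fd => !(fd.items.isEmpty || !(fd.get? "type" == some "reference"))

theorem pvParts_strip (t : List Char) : pvParts [] (PySem.Chars.strip t) = pvParts [] t := by
  unfold pvParts
  have h := Mpre_strip t
  unfold Mpre at h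
  rw [show ((splitC '.' [] (PySem.Chars.strip t)).map (fun s => String.ofList (PySem.Chars.strip s)))
        = ((splitC '.' [] (PySem.Chars.strip t)).map PySem.Chars.strip).map String.ofList by simp [List.map_map],
      show ((splitC '.' [] t).map (fun s => String.ofList (PySem.Chars.strip s)))
        = ((splitC '.' [] t).map PySem.Chars.strip).map String.ofList by simp [List.map_map], h]

-- A's per-token parts pipeline is pvParts of the raw token
theorem pvA_parts_eq (t : List Char) :
    ((pvSplit (String.ofList (PySem.Chars.strip t)) ".").map PySem.Str.strip).filter (fun p => !(p == "")) = pvParts [] t := by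
  rw [pvSplit_char _ '.' "." rfl]
  rw [show (String.ofList (PySem.Chars.strip t)).toList = PySem.Chars.strip t from by simp]
  rw [List.map_map]
  have hfn : (PySem.Str.strip ∘ String.ofList) = (fun s => String.ofList (PySem.Chars.strip s)) := by
    funext x; simp [PySem.Str.strip]
  rw [hfn]
  exact pvParts_strip t

-- A's loop is the reference loop with condA
theorem pvA_loop_eq_RefLoop (sl : PySem.Dict String (PySem.Dict String String)) :
    ∀ (ts : List (List Char)) (acc : List (List String)),
      pvA_loop sl (ts.map String.ofList) acc = RefLoop (condA sl) ts acc := by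
  intro ts
  induction ts with
  | nil => intro acc; simp [pvA_loop, RefLoop]
  | cons t rest ih =>
    intro acc
    rw [List.map_cons]
    have hstr : PySem.Str.strip (String.ofList t) = String.ofList (PySem.Chars.strip t) := by
      simp [PySem.Str.strip]
    by_cases hraw : String.ofList (PySem.Chars.strip t) = ""
    · have hst : PySem.Chars.strip t = [] := by
        have := congrArg String.toList hraw
        simpa using this
      have hpe : pvParts [] t = [] := by
        rw [← pvParts_strip, hst]
        rfl
      simp only [pvA_loop, hstr, hraw, if_pos]
      rw [ih, RefLoop, hpe]
      simp
    · simp only [pvA_loop, hstr, if_neg hraw, pvA_parts_eq]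
      rw [RefLoop]
      by_cases hpe : (pvParts [] t).isEmpty
      · simp only [hpe, if_pos, if_true]
        exact ih acc
      · simp only [hpe, Bool.false_eq_true, if_false]
        unfold condA
        cases hget : sl.get? ((pvParts [] t).headD "") with
        | none => simp
        | some fd =>
          by_cases hb : (fd.items.isEmpty || !(fd.get? "type" == some "reference")) = true
          · simp [hb]
          · simp only [hb, Bool.false_eq_true, if_false, eq_false_of_ne_true hb, Bool.not_false, if_true]
            exact ih (acc ++ [pvParts [] t])

-- B's scanner: one token (no ',' inside), then the rest
theorem pvScan_token (valid : PySem.Set String) :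
    ∀ (u : List Char), (∀ c ∈ u, c ≠ ',') → ∀ (rest : List Char) (paths : List (List String)) (path : List String) (cur : List Char),
      pvScan valid (u ++ ',' :: rest) paths path cur =
        (let parts := path ++ pvParts cur u
         if parts.isEmpty then pvScan valid rest paths [] []
         else if parts.headD "" ∈ valid then pvScan valid rest (paths ++ [parts]) [] []
         else ([], some (parts.headD ""))) := by
  intro u
  induction u with
  | nil =>
    intro _ rest paths path cur
    show pvScan valid (',' :: rest) paths path cur = _
    rw [pvScan]
    have hcomma : (',' = ',' ∨ ',' = '.') := Or.inl rfl
    rw [if_pos hcomma, if_pos rfl]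
    have hparts : pvParts cur [] =
        if PySem.Str.strip (String.ofList cur) = "" then ([] : List String)
        else [PySem.Str.strip (String.ofList cur)] := by
      have hs : PySem.Str.strip (String.ofList cur) = String.ofList (PySem.Chars.strip cur) := by
        simp [PySem.Str.strip]
      simp only [pvParts, splitC, List.map_cons, List.map_nil, List.filter_cons, List.filter_nil, hs]
      by_cases h : String.ofList (PySem.Chars.strip cur) = ""
      · simp [h]
      · simp [h]
    simp only [hparts]
    by_cases h : PySem.Str.strip (String.ofList cur) = ""
    · simp [h]
    · simp [h]
  | cons c u' ih =>
    intro hnc rest paths path cur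
    have hc : c ≠ ',' := hnc c (by simp)
    show pvScan valid (c :: (u' ++ ',' :: rest)) paths path cur = _
    rw [pvScan]
    by_cases hd : c = '.'
    · subst hd
      rw [if_pos (Or.inr rfl), if_neg (by simp)]
      rw [ih (fun x hx => hnc x (by simp [hx]))]
      have hs : PySem.Str.strip (String.ofList cur) = String.ofList (PySem.Chars.strip cur) := by
        simp [PySem.Str.strip]
      have hP : pvParts cur ('.' :: u') =
          (if PySem.Str.strip (String.ofList cur) = "" then ([] : List String)
           else [PySem.Str.strip (String.ofList cur)]) ++ pvParts [] u' := by
        simp only [pvParts, splitC, if_pos rfl, List.map_cons, List.filter_cons, hs]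
        by_cases h : String.ofList (PySem.Chars.strip cur) = ""
        · simp [h]
        · simp [h]
      simp only [hP]
      by_cases h : PySem.Str.strip (String.ofList cur) = ""
      · simp [h]
      · simp [h, List.append_assoc]
    · rw [if_neg (by simp [hc, hd])]
      rw [ih (fun x hx => hnc x (by simp [hx]))]
      have hP : pvParts cur (c :: u') = pvParts (cur ++ [c]) u' := by
        simp only [pvParts, splitC, if_neg hd]
      rw [hP]

-- tail of a one-char split, after the first separator (or nothing)
def restSplit (d : Char) : List Char → List (List Char)
  | [] => []
  | _ :: r => splitC d [] r

theorem splitC_takeDrop (d : Char) :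
    ∀ (t pre : List Char),
      splitC d pre t = (pre ++ t.takeWhile (fun c => !(c == d))) :: restSplit d (t.dropWhile (fun c => !(c == d))) := by
  intro t
  induction t with
  | nil => intro pre; simp [splitC, restSplit]
  | cons c r ih =>
    intro pre
    by_cases hc : c = d
    · subst hc
      simp [splitC, restSplit, List.takeWhile_cons, List.dropWhile_cons]
    · have hb : (!(c == d)) = true := by simp [hc]
      simp only [splitC, if_neg hc, List.takeWhile_cons, List.dropWhile_cons, hb, if_pos]
      rw [ih (pre ++ [c])]
      simp

-- a single final token
theorem pvScan_single (valid : PySem.Set String) (t : List Char) (ht : ∀ c ∈ t, c ≠ ',')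
    (paths : List (List String)) :
    pvScan valid (t ++ [',']) paths [] [] = RefLoop (fun r => decide (r ∈ valid)) [t] paths := by
  have h := pvScan_token valid t ht [] paths [] []
  rw [h]
  simp only [RefLoop, List.nil_append]
  by_cases h1 : (pvParts [] t).isEmpty
  · simp [h1, pvScan, RefLoop]
  · by_cases h2 : (pvParts [] t).headD "" ∈ valid
    · simp [h1, h2, pvScan, RefLoop]
    · simp [h1, h2, pvScan, RefLoop]

-- B's scanner is the reference loop with set membership
theorem pvScan_eq_RefLoop (valid : PySem.Set String) :
    ∀ (cs : List Char) (paths : List (List String)),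
      pvScan valid (cs ++ [',']) paths [] [] = RefLoop (fun r => decide (r ∈ valid)) (splitC ',' [] cs) paths := by
  have H : ∀ (n : Nat) (cs : List Char), cs.length ≤ n → ∀ (paths : List (List String)),
      pvScan valid (cs ++ [',']) paths [] [] = RefLoop (fun r => decide (r ∈ valid)) (splitC ',' [] cs) paths := by
    intro n
    induction n with
    | zero =>
      intro cs hcs paths
      have : cs = [] := by cases cs <;> simp_all
      subst this
      rw [show splitC ',' [] [] = [[]] from rfl]
      exact pvScan_single valid [] (by simp) paths
    | succ n ihn =>
      intro cs hcs paths
      cases hdw : cs.dropWhile (fun c => !(c == ',')) with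
      | nil =>
        have hdw' := hdw
        rw [List.dropWhile_eq_nil_iff] at hdw'
        have ht : ∀ c ∈ cs, c ≠ ',' := fun c hc => by simpa using hdw' c hc
        rw [splitC_takeDrop, hdw]
        have htw : cs.takeWhile (fun c => !(c == ',')) = cs := by
          conv_rhs => rw [← List.takeWhile_append_dropWhile (p := fun c => !(c == ',')) (l := cs)]
          rw [hdw]
          simp
        rw [htw]
        simp only [restSplit, List.nil_append]
        exact pvScan_single valid cs ht paths
      | cons c r =>
        have hc : c = ',' := by
          have hne : List.dropWhile (fun c => !(c == ',')) cs ≠ [] := by rw [hdw]; simp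
          have h := List.head_dropWhile_not (fun c => !(c == ',')) hne
          have hh : (List.dropWhile (fun c => !(c == ',')) cs).head hne = c := by
            simp [hdw]
          rw [hh] at h
          simpa using h
        subst hc
        have hsplit : cs = cs.takeWhile (fun c => !(c == ',')) ++ ',' :: r := by
          conv_lhs => rw [← List.takeWhile_append_dropWhile (p := fun c => !(c == ',')) (l := cs)]
          rw [hdw]
        set t := cs.takeWhile (fun c => !(c == ',')) with htdef
        have ht : ∀ c ∈ t, c ≠ ',' := by
          intro x hx
          have := List.mem_takeWhile_imp hx
          simpa using this
        have hlen : r.length ≤ n := by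
          have : cs.length = t.length + 1 + r.length := by rw [hsplit]; simp; omega
          omega
        rw [splitC_takeDrop, hdw]
        simp only [restSplit, List.nil_append]
        rw [← htdef]
        have harr : cs ++ [','] = t ++ ',' :: (r ++ [',']) := by rw [hsplit]; simp
        rw [harr, pvScan_token valid t ht (r ++ [',']) paths [] []]
        simp only [RefLoop, List.nil_append]
        by_cases h1 : (pvParts [] t).isEmpty
        · rw [if_pos h1, if_pos h1]
          exact ihn r hlen paths
        · rw [if_neg h1, if_neg h1]
          by_cases h2 : (pvParts [] t).headD "" ∈ valid
          · rw [if_pos h2, if_pos (show decide ((pvParts [] t).headD "" ∈ valid) = true from by simpa using h2)]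
            exact ihn r hlen (paths ++ [pvParts [] t])
          · rw [if_neg h2, if_neg (show ¬ decide ((pvParts [] t).headD "" ∈ valid) = true from by simpa using h2)]
  intro cs paths
  exact H cs.length cs le_rfl paths

-- inserting never empties a dict's items
theorem insert_items_ne_nil (d : PySem.Dict String String) (k v : String) :
    (d.insert k v).items ≠ [] := by
  rw [PySem.Dict.items_insert]
  by_cases hc : d.contains k
  · simp only [hc, if_pos]
    intro h
    rcases d with ⟨l⟩
    cases l with
    | nil => simp at hc
    | cons p ps => simp at h
  · simp [hc]

theorem update_items_ne_nil :
    ∀ (ps : List (String × String)) (d : PySem.Dict String String), ps ≠ [] ∨ d.items ≠ [] →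
      (d.update ps).items ≠ [] := by
  intro ps
  induction ps with
  | nil =>
    intro d h
    rcases h with h | h
    · exact absurd rfl h
    · simpa [PySem.Dict.update] using h
  | cons p ps ih =>
    intro d _
    show (List.foldl (fun acc q => acc.insert q.1 q.2) d (p :: ps)).items ≠ []
    simp only [List.foldl_cons]
    exact ih (d.insert p.1 p.2) (Or.inr (insert_items_ne_nil d p.1 p.2))

-- A's validity test agrees with membership in B's valid set, under Pre_
-- every value stored by pvLookup is a nonempty field dict (its source list carries "name")
theorem lookup_items_ne (schema : List (List (String × String)))
    (hpre : ∀ f ∈ schema, "name" ∈ f.map Prod.fst) :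
    ∀ (d1 : PySem.Dict String (PySem.Dict String String)),
      (∀ k fd, d1.get? k = some fd → fd.items ≠ []) →
      ∀ k fd, ((schema.foldl (fun d f => d.insert ((PySem.Dict.ofList f).getD "name" "") (PySem.Dict.ofList f)) d1).get? k) = some fd → fd.items ≠ [] := by
  induction schema with
  | nil => intro d1 h k fd hget; exact h k fd hget
  | cons f rest ih =>
    intro d1 h k fd hget
    have hf : "name" ∈ f.map Prod.fst := hpre f (by simp)
    have hfne : f ≠ [] := by
      intro hnil; rw [hnil] at hf; simp at hf
    refine ih (fun g hg => hpre g (by simp [hg])) (d1.insert ((PySem.Dict.ofList f).getD "name" "") (PySem.Dict.ofList f)) ?_ k fd (by simpa using hget)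
    intro k' fd' hget'
    rw [PySem.Dict.get?_insert] at hget'
    by_cases hk : k' = (PySem.Dict.ofList f).getD "name" ""
    · rw [if_pos hk] at hget'
      have : fd' = PySem.Dict.ofList f := (Option.some.inj hget').symm
      rw [this]
      exact update_items_ne_nil f PySem.Dict.empty (Or.inl hfne)
    · rw [if_neg hk] at hget'
      exact h k' fd' hget'

-- membership in the valid set is a "type = reference" lookup in the types dict
theorem mem_valid_iff (schema : List (List (String × String))) (root : String) :
    root ∈ pvValid schema ↔ (pvTypes schema).get? root = some (some "reference") := by
  have hnd : (pvTypes schema).keys.Nodup := by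
    unfold pvTypes
    exact PySem.Dict.nodup_keys_foldl_insert_key schema (fun f => (PySem.Dict.ofList f).getD "name" "")
      (fun _ f => (PySem.Dict.ofList f).get? "type") PySem.Dict.empty (by simp [PySem.Dict.nodup_keys_empty])
  unfold pvValid
  rw [PySem.Set.mem_ofList]
  constructor
  · intro h
    rcases List.mem_map.mp h with ⟨p, hp, hp1⟩
    rcases List.mem_filter.mp hp with ⟨hmem, hbeq⟩
    have hv : p.2 = some "reference" := by simpa using hbeq
    have := PySem.Dict.get?_of_mem_items (pvTypes schema) (show (p.1, p.2) ∈ (pvTypes schema).items from by simpa using hmem) hnd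
    rw [hp1, hv] at this
    exact this
  · intro h
    have hmem := PySem.Dict.mem_items_of_get?_eq_some (pvTypes schema) h
    exact List.mem_map.mpr ⟨(root, some "reference"), List.mem_filter.mpr ⟨hmem, by simp⟩, rfl⟩

-- the types dict is the lookup dict with each field def replaced by its "type" entry
theorem types_get_par (schema : List (List (String × String))) :
    ∀ (d1 : PySem.Dict String (PySem.Dict String String)) (d2 : PySem.Dict String (Option String)),
      (∀ k, d2.get? k = (d1.get? k).map (fun fd => fd.get? "type")) →
      ∀ k, (schema.foldl (fun d f => d.insert ((PySem.Dict.ofList f).getD "name" "") ((PySem.Dict.ofList f).get? "type")) d2).get? k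
        = ((schema.foldl (fun d f => d.insert ((PySem.Dict.ofList f).getD "name" "") (PySem.Dict.ofList f)) d1).get? k).map (fun fd => fd.get? "type") := by
  induction schema with
  | nil => intro d1 d2 h k; simpa using h k
  | cons f rest ih =>
    intro d1 d2 h k
    simp only [List.foldl_cons]
    apply ih
    intro k'
    rw [PySem.Dict.get?_insert, PySem.Dict.get?_insert]
    by_cases hk : k' = (PySem.Dict.ofList f).getD "name" ""
    · simp [hk]
    · simp [hk, h k']

theorem condA_eq_mem (schema : List (List (String × String)))
    (hpre : ∀ f ∈ schema, "name" ∈ f.map Prod.fst) (root : String) :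
    condA (pvLookup schema) root = decide (root ∈ pvValid schema) := by
  have htypes := types_get_par schema PySem.Dict.empty PySem.Dict.empty
    (by intro k; simp [PySem.Dict.get?_empty])
  unfold condA
  cases hget : (pvLookup schema).get? root with
  | none =>
    have hn : (pvTypes schema).get? root = none := by
      rw [show (pvTypes schema).get? root = ((pvLookup schema).get? root).map (fun fd => fd.get? "type") from htypes root, hget]
      rfl
    have hnm : ¬ root ∈ pvValid schema := by
      intro hm
      rw [mem_valid_iff] at hm
      rw [hn] at hm
      simp at hm
    simp [hnm]
  | some fd =>
    have hne : fd.items ≠ [] := lookup_items_ne schema hpre PySem.Dict.empty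
      (by intro k fd' h; rw [PySem.Dict.get?_empty] at h; simp at h) root fd hget
    have hie : fd.items.isEmpty = false := by simpa [List.isEmpty_iff] using hne
    have ht : (pvTypes schema).get? root = some (fd.get? "type") := by
      rw [show (pvTypes schema).get? root = ((pvLookup schema).get? root).map (fun fd => fd.get? "type") from htypes root, hget]
      rfl
    by_cases hr : fd.get? "type" = some "reference"
    · have hm : root ∈ pvValid schema := (mem_valid_iff schema root).mpr (by rw [ht, hr])
      simp [hie, hr, hm]
    · have hm : ¬ root ∈ pvValid schema := by
        intro hm
        have := (mem_valid_iff schema root).mp hm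
        rw [ht] at this
        exact hr (Option.some.inj this)
      simp [hie, hr, hm]

-- ===== VERDICT (by name: the statement is the Claim_ definition above) =====
theorem parse_expand_param_py_spec : Claim_equal_parse_expand_param_py := by
  intro expand schema _ hpre
  unfold Spec_parse_expand_param_py parse_expand_param_py parse_expand_param_py_alt
  rw [pvSplit_char expand ',' "," rfl]
  rw [pvA_loop_eq_RefLoop, pvScan_eq_RefLoop]
  have : (condA (pvLookup schema)) = (fun r => decide (r ∈ pvValid schema)) := by
    funext r; exact condA_eq_mem schema hpre r
  rw [this]
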